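-- pv_equiv track=rewrite | github.com/cwchilders/OpenMic | tonex/analyze_preset_params.py | categorize_parameters
-- ===== SOURCE A (Python) =====
-- from typing import List, Dict, Tuple
--
-- def categorize_parameters(columns: List[str]) -> Dict[str, List[str]]:
--     """Categorize parameters by their function"""
--     categories = {
--         'Metadata': [],
--         'Amp Model': [],
--         'EQ': [],
--         'Compression': [],
--         'Noise Gate': [],
--         'Modulation': [],
--         'Delay': [],
--         'Reverb': [],
--         'Cabinet': [],
--         'Hardware Control A': [],
--         'Hardware Control B': [],
--         'Other': []
--     }
--
--     for col in columns:
--         if col.startswith('HWParamA_'):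
--             categories['Hardware Control A'].append(col)
--         elif col.startswith('HWParamB_'):
--             categories['Hardware Control B'].append(col)
--         elif col in ['GUID', 'Version', 'ToneModel_GUID', 'OptionalToneModel_GUID', 'Tag_PresetName',
--                      'Tag_UserName', 'Tag_ModelerTags', 'Tag_Date', 'Tag_ModelCategory', 'Tag_Instrument',
--                      'Tag_InstrumentType', 'Tag_PickupPosition', 'Tag_PickupType', 'Tag_Artist',
--                      'Tag_Album', 'Tag_Song', 'Tag_SongPart', 'Tag_Genre', 'Tag_Description']:
--             categories['Metadata'].append(col)
--         elif col.startswith('Eq') or col.startswith('PwrAmpEq'):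
--             categories['EQ'].append(col)
--         elif col.startswith('Comp'):
--             categories['Compression'].append(col)
--         elif col.startswith('NoiseGate'):
--             categories['Noise Gate'].append(col)
--         elif col.startswith('Mod'):
--             categories['Modulation'].append(col)
--         elif col.startswith('Delay'):
--             categories['Delay'].append(col)
--         elif col.startswith('Reverb'):
--             categories['Reverb'].append(col)
--         elif col.startswith('Cab') or col.startswith('VIRCab'):
--             categories['Cabinet'].append(col)
--         elif col.startswith('Model') or col in ['BPM']:
--             categories['Amp Model'].append(col)
--         elif col in ['HW_ExtControllerEnable', 'Favorite']:
--             categories['Other'].append(col)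
--         else:
--             categories['Other'].append(col)
--
--     return categories
-- ===== SOURCE B (Python) =====
-- from typing import List, Dict
--
-- CATEGORY_NAMES = ['Metadata', 'Amp Model', 'EQ', 'Compression', 'Noise Gate', 'Modulation',
--                   'Delay', 'Reverb', 'Cabinet', 'Hardware Control A', 'Hardware Control B', 'Other']
--
-- METADATA_COLS = ['GUID', 'Version', 'ToneModel_GUID', 'OptionalToneModel_GUID', 'Tag_PresetName',
--                  'Tag_UserName', 'Tag_ModelerTags', 'Tag_Date', 'Tag_ModelCategory', 'Tag_Instrument',
--                  'Tag_InstrumentType', 'Tag_PickupPosition', 'Tag_PickupType', 'Tag_Artist',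
--                  'Tag_Album', 'Tag_Song', 'Tag_SongPart', 'Tag_Genre', 'Tag_Description']
--
-- RULES = [
--     (lambda c: c.startswith('HWParamA_'), 'Hardware Control A'),
--     (lambda c: c.startswith('HWParamB_'), 'Hardware Control B'),
--     (lambda c: c in METADATA_COLS, 'Metadata'),
--     (lambda c: c.startswith('Eq') or c.startswith('PwrAmpEq'), 'EQ'),
--     (lambda c: c.startswith('Comp'), 'Compression'),
--     (lambda c: c.startswith('NoiseGate'), 'Noise Gate'),
--     (lambda c: c.startswith('Mod'), 'Modulation'),
--     (lambda c: c.startswith('Delay'), 'Delay'),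
--     (lambda c: c.startswith('Reverb'), 'Reverb'),
--     (lambda c: c.startswith('Cab') or c.startswith('VIRCab'), 'Cabinet'),
--     (lambda c: c.startswith('Model') or c == 'BPM', 'Amp Model'),
-- ]
--
-- def classify(col):
--     """First matching rule wins; anything unmatched is 'Other'."""
--     return next((cat for test, cat in RULES if test(col)), 'Other')
--
-- def categorize_parameters(columns: List[str]) -> Dict[str, List[str]]:
--     """Categorize parameters by their function"""
--     tagged = [(classify(c), c) for c in columns]
--     return {name: [c for k, c in tagged if k == name] for name in CATEGORY_NAMES}
-- ===== Notes on version B (the rewrite author's own statement) =====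
-- stated objective: idiomatic
-- what changed: A's single-pass if/elif cascade appending into a mutable dict is replaced by a declarative rules table with a first-match classify() helper, one tagging pass computing (classify(c), c) pairs, and a per-category dict comprehension that builds each bucket by filtering the tagged columns.
import Mathlib
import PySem

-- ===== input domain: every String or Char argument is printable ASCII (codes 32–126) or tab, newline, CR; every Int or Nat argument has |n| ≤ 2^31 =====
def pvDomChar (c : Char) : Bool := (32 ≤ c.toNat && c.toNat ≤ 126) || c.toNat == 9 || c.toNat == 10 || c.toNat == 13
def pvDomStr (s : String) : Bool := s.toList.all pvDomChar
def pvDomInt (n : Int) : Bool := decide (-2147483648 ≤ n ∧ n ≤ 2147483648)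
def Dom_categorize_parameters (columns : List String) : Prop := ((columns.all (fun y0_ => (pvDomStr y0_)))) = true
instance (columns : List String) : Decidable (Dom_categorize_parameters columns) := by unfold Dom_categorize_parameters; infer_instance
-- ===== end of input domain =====

-- B replaces A's single-pass if/elif cascade by a first-match classifier over a rules table plus a
-- per-category dict comprehension (build each bucket by filtering); objective: idiomatic, not faster.

-- ===== PORT A =====
def pvMetaCols : List String :=
  ["GUID", "Version", "ToneModel_GUID", "OptionalToneModel_GUID", "Tag_PresetName",
   "Tag_UserName", "Tag_ModelerTags", "Tag_Date", "Tag_ModelCategory", "Tag_Instrument",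
   "Tag_InstrumentType", "Tag_PickupPosition", "Tag_PickupType", "Tag_Artist",
   "Tag_Album", "Tag_Song", "Tag_SongPart", "Tag_Genre", "Tag_Description"]

-- loop body of A's `for col in columns` (the if/elif chain; `list.append` = modify the bucket in place)
def pvStepA (cats : PySem.Dict String (List String)) (col : String) : PySem.Dict String (List String) :=
  if PySem.Str.startswith col "HWParamA_" then cats.modify "Hardware Control A" [] (· ++ [col])
  else if PySem.Str.startswith col "HWParamB_" then cats.modify "Hardware Control B" [] (· ++ [col])
  else if pvMetaCols.contains col then cats.modify "Metadata" [] (· ++ [col])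
  else if PySem.Str.startswith col "Eq" || PySem.Str.startswith col "PwrAmpEq" then cats.modify "EQ" [] (· ++ [col])
  else if PySem.Str.startswith col "Comp" then cats.modify "Compression" [] (· ++ [col])
  else if PySem.Str.startswith col "NoiseGate" then cats.modify "Noise Gate" [] (· ++ [col])
  else if PySem.Str.startswith col "Mod" then cats.modify "Modulation" [] (· ++ [col])
  else if PySem.Str.startswith col "Delay" then cats.modify "Delay" [] (· ++ [col])
  else if PySem.Str.startswith col "Reverb" then cats.modify "Reverb" [] (· ++ [col])
  else if PySem.Str.startswith col "Cab" || PySem.Str.startswith col "VIRCab" then cats.modify "Cabinet" [] (· ++ [col])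
  else if PySem.Str.startswith col "Model" || (["BPM"] : List String).contains col then cats.modify "Amp Model" [] (· ++ [col])
  else if (["HW_ExtControllerEnable", "Favorite"] : List String).contains col then cats.modify "Other" [] (· ++ [col])
  else cats.modify "Other" [] (· ++ [col])

def categorize_parameters (columns : List String) : List (String × List String) :=
  let categories : PySem.Dict String (List String) := PySem.Dict.ofList
    [("Metadata", []), ("Amp Model", []), ("EQ", []), ("Compression", []),
     ("Noise Gate", []), ("Modulation", []), ("Delay", []), ("Reverb", []),
     ("Cabinet", []), ("Hardware Control A", []), ("Hardware Control B", []), ("Other", [])]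
  (columns.foldl pvStepA categories).items

-- ===== PORT B =====
def pvCategoryNames : List String :=
  ["Metadata", "Amp Model", "EQ", "Compression", "Noise Gate", "Modulation",
   "Delay", "Reverb", "Cabinet", "Hardware Control A", "Hardware Control B", "Other"]

def pvRules : List ((String → Bool) × String) :=
  [(fun c => PySem.Str.startswith c "HWParamA_", "Hardware Control A"),
   (fun c => PySem.Str.startswith c "HWParamB_", "Hardware Control B"),
   (fun c => pvMetaCols.contains c, "Metadata"),
   (fun c => PySem.Str.startswith c "Eq" || PySem.Str.startswith c "PwrAmpEq", "EQ"),
   (fun c => PySem.Str.startswith c "Comp", "Compression"),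
   (fun c => PySem.Str.startswith c "NoiseGate", "Noise Gate"),
   (fun c => PySem.Str.startswith c "Mod", "Modulation"),
   (fun c => PySem.Str.startswith c "Delay", "Delay"),
   (fun c => PySem.Str.startswith c "Reverb", "Reverb"),
   (fun c => PySem.Str.startswith c "Cab" || PySem.Str.startswith c "VIRCab", "Cabinet"),
   (fun c => PySem.Str.startswith c "Model" || c == "BPM", "Amp Model")]

def pvClassify (col : String) : String :=
  match pvRules.find? (fun r => r.1 col) with
  | some r => r.2
  | none => "Other"

def categorize_parameters_alt (columns : List String) : List (String × List String) :=
  let tagged := columns.map (fun c => (pvClassify c, c))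
  pvCategoryNames.map (fun name => (name, (tagged.filter (fun p => p.1 == name)).map (·.2)))

-- ===== PRECONDITION & SPEC =====
def Spec_categorize_parameters (columns : List String) (out : List (String × List String)) : Prop := out = categorize_parameters_alt columns
instance (columns : List String) (out : List (String × List String)) : Decidable (Spec_categorize_parameters columns out) := by unfold Spec_categorize_parameters; infer_instance

-- ===== CLAIM (what is proved, stated in full; the proofs are below) =====
def Claim_equal_categorize_parameters : Prop := ∀ (columns : List String), Dom_categorize_parameters columns → Spec_categorize_parameters columns (categorize_parameters columns)

-- ===== LEMMAS AND PROOFS =====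

-- A's branch chain and B's first-match rule scan pick the same bucket for every column.
theorem pvStepA_eq_modify_classify (cats : PySem.Dict String (List String)) (col : String) :
    pvStepA cats col = cats.modify (pvClassify col) [] (· ++ [col]) := by
  unfold pvStepA
  by_cases h1 : PySem.Str.startswith col "HWParamA_" = true
  · rw [if_pos h1, show pvClassify col = "Hardware Control A" from by simp only [pvClassify, pvRules, List.find?, h1]]
  rw [if_neg h1]
  rw [Bool.not_eq_true] at h1
  by_cases h2 : PySem.Str.startswith col "HWParamB_" = true
  · rw [if_pos h2, show pvClassify col = "Hardware Control B" from by simp only [pvClassify, pvRules, List.find?, h1, h2]]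
  rw [if_neg h2]
  rw [Bool.not_eq_true] at h2
  by_cases h3 : pvMetaCols.contains col = true
  · rw [if_pos h3, show pvClassify col = "Metadata" from by simp only [pvClassify, pvRules, List.find?, h1, h2, h3]]
  rw [if_neg h3]
  rw [Bool.not_eq_true] at h3
  by_cases h4 : (PySem.Str.startswith col "Eq" || PySem.Str.startswith col "PwrAmpEq") = true
  · rw [if_pos h4, show pvClassify col = "EQ" from by simp only [pvClassify, pvRules, List.find?, h1, h2, h3, h4]]
  rw [if_neg h4]
  rw [Bool.not_eq_true] at h4
  by_cases h5 : PySem.Str.startswith col "Comp" = true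
  · rw [if_pos h5, show pvClassify col = "Compression" from by simp only [pvClassify, pvRules, List.find?, h1, h2, h3, h4, h5]]
  rw [if_neg h5]
  rw [Bool.not_eq_true] at h5
  by_cases h6 : PySem.Str.startswith col "NoiseGate" = true
  · rw [if_pos h6, show pvClassify col = "Noise Gate" from by simp only [pvClassify, pvRules, List.find?, h1, h2, h3, h4, h5, h6]]
  rw [if_neg h6]
  rw [Bool.not_eq_true] at h6
  by_cases h7 : PySem.Str.startswith col "Mod" = true
  · rw [if_pos h7, show pvClassify col = "Modulation" from by simp only [pvClassify, pvRules, List.find?, h1, h2, h3, h4, h5, h6, h7]]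
  rw [if_neg h7]
  rw [Bool.not_eq_true] at h7
  by_cases h8 : PySem.Str.startswith col "Delay" = true
  · rw [if_pos h8, show pvClassify col = "Delay" from by simp only [pvClassify, pvRules, List.find?, h1, h2, h3, h4, h5, h6, h7, h8]]
  rw [if_neg h8]
  rw [Bool.not_eq_true] at h8
  by_cases h9 : PySem.Str.startswith col "Reverb" = true
  · rw [if_pos h9, show pvClassify col = "Reverb" from by simp only [pvClassify, pvRules, List.find?, h1, h2, h3, h4, h5, h6, h7, h8, h9]]
  rw [if_neg h9]
  rw [Bool.not_eq_true] at h9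
  by_cases h10 : (PySem.Str.startswith col "Cab" || PySem.Str.startswith col "VIRCab") = true
  · rw [if_pos h10, show pvClassify col = "Cabinet" from by simp only [pvClassify, pvRules, List.find?, h1, h2, h3, h4, h5, h6, h7, h8, h9, h10]]
  rw [if_neg h10]
  rw [Bool.not_eq_true] at h10
  by_cases h11 : (PySem.Str.startswith col "Model" || (["BPM"] : List String).contains col) = true
  · rw [if_pos h11]
    rw [show ((["BPM"] : List String).contains col) = (col == "BPM") from by by_cases hbpm : col = "BPM" <;> simp [hbpm]] at h11
    rw [show pvClassify col = "Amp Model" from by simp only [pvClassify, pvRules, List.find?, h1, h2, h3, h4, h5, h6, h7, h8, h9, h10, h11]]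
  rw [if_neg h11]
  rw [Bool.not_eq_true] at h11
  rw [show ((["BPM"] : List String).contains col) = (col == "BPM") from by by_cases hbpm : col = "BPM" <;> simp [hbpm]] at h11
  by_cases h12 : (["HW_ExtControllerEnable", "Favorite"] : List String).contains col = true
  · rw [if_pos h12, show pvClassify col = "Other" from by simp only [pvClassify, pvRules, List.find?, h1, h2, h3, h4, h5, h6, h7, h8, h9, h10, h11]]
  rw [if_neg h12]
  rw [Bool.not_eq_true] at h12
  rw [show pvClassify col = "Other" from by simp only [pvClassify, pvRules, List.find?, h1, h2, h3, h4, h5, h6, h7, h8, h9, h10, h11]]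

theorem pvClassify_cases (c : String) :
    pvClassify c = "Metadata" ∨ pvClassify c = "Amp Model" ∨ pvClassify c = "EQ" ∨
    pvClassify c = "Compression" ∨ pvClassify c = "Noise Gate" ∨ pvClassify c = "Modulation" ∨
    pvClassify c = "Delay" ∨ pvClassify c = "Reverb" ∨ pvClassify c = "Cabinet" ∨
    pvClassify c = "Hardware Control A" ∨ pvClassify c = "Hardware Control B" ∨
    pvClassify c = "Other" := by
  unfold pvClassify
  cases h : pvRules.find? (fun r => r.1 c) with
  | none => simp
  | some r =>
    have hm := List.mem_of_find?_eq_some h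
    simp only [pvRules, List.mem_cons, List.not_mem_nil, or_false] at hm
    rcases hm with rfl | rfl | rfl | rfl | rfl | rfl | rfl | rfl | rfl | rfl | rfl <;> simp

-- loop invariant: A's loop (rephrased via pvClassify) appends exactly the matching columns,
-- in order, to each bucket.
theorem pvFold_classify (cols : List String)
    (m a e co ng mo de re cb ha hb ot : List String) :
    (cols.foldl (fun d c => d.modify (pvClassify c) [] (· ++ [c]))
      (PySem.Dict.mk [("Metadata", m), ("Amp Model", a), ("EQ", e), ("Compression", co), ("Noise Gate", ng), ("Modulation", mo), ("Delay", de), ("Reverb", re), ("Cabinet", cb), ("Hardware Control A", ha), ("Hardware Control B", hb), ("Other", ot)])).items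
    = [("Metadata", m ++ cols.filter (fun c => pvClassify c == "Metadata")),
       ("Amp Model", a ++ cols.filter (fun c => pvClassify c == "Amp Model")),
       ("EQ", e ++ cols.filter (fun c => pvClassify c == "EQ")),
       ("Compression", co ++ cols.filter (fun c => pvClassify c == "Compression")),
       ("Noise Gate", ng ++ cols.filter (fun c => pvClassify c == "Noise Gate")),
       ("Modulation", mo ++ cols.filter (fun c => pvClassify c == "Modulation")),
       ("Delay", de ++ cols.filter (fun c => pvClassify c == "Delay")),
       ("Reverb", re ++ cols.filter (fun c => pvClassify c == "Reverb")),
       ("Cabinet", cb ++ cols.filter (fun c => pvClassify c == "Cabinet")),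
       ("Hardware Control A", ha ++ cols.filter (fun c => pvClassify c == "Hardware Control A")),
       ("Hardware Control B", hb ++ cols.filter (fun c => pvClassify c == "Hardware Control B")),
       ("Other", ot ++ cols.filter (fun c => pvClassify c == "Other"))] := by
  induction cols generalizing m a e co ng mo de re cb ha hb ot with
  | nil => simp
  | cons c cs ih =>
    rcases pvClassify_cases c with hk | hk | hk | hk | hk | hk | hk | hk | hk | hk | hk | hk
    · have hd : (PySem.Dict.mk [("Metadata", m), ("Amp Model", a), ("EQ", e), ("Compression", co), ("Noise Gate", ng), ("Modulation", mo), ("Delay", de), ("Reverb", re), ("Cabinet", cb), ("Hardware Control A", ha), ("Hardware Control B", hb), ("Other", ot)] : PySem.Dict String (List String)).modify "Metadata" [] (· ++ [c]) = PySem.Dict.mk [("Metadata", m ++ [c]), ("Amp Model", a), ("EQ", e), ("Compression", co), ("Noise Gate", ng), ("Modulation", mo), ("Delay", de), ("Reverb", re), ("Cabinet", cb), ("Hardware Control A", ha), ("Hardware Control B", hb), ("Other", ot)] := rfl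
      simp only [List.foldl_cons, hk, hd, ih]
      simp [hk]
    · have hd : (PySem.Dict.mk [("Metadata", m), ("Amp Model", a), ("EQ", e), ("Compression", co), ("Noise Gate", ng), ("Modulation", mo), ("Delay", de), ("Reverb", re), ("Cabinet", cb), ("Hardware Control A", ha), ("Hardware Control B", hb), ("Other", ot)] : PySem.Dict String (List String)).modify "Amp Model" [] (· ++ [c]) = PySem.Dict.mk [("Metadata", m), ("Amp Model", a ++ [c]), ("EQ", e), ("Compression", co), ("Noise Gate", ng), ("Modulation", mo), ("Delay", de), ("Reverb", re), ("Cabinet", cb), ("Hardware Control A", ha), ("Hardware Control B", hb), ("Other", ot)] := rfl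
      simp only [List.foldl_cons, hk, hd, ih]
      simp [hk]
    · have hd : (PySem.Dict.mk [("Metadata", m), ("Amp Model", a), ("EQ", e), ("Compression", co), ("Noise Gate", ng), ("Modulation", mo), ("Delay", de), ("Reverb", re), ("Cabinet", cb), ("Hardware Control A", ha), ("Hardware Control B", hb), ("Other", ot)] : PySem.Dict String (List String)).modify "EQ" [] (· ++ [c]) = PySem.Dict.mk [("Metadata", m), ("Amp Model", a), ("EQ", e ++ [c]), ("Compression", co), ("Noise Gate", ng), ("Modulation", mo), ("Delay", de), ("Reverb", re), ("Cabinet", cb), ("Hardware Control A", ha), ("Hardware Control B", hb), ("Other", ot)] := rfl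
      simp only [List.foldl_cons, hk, hd, ih]
      simp [hk]
    · have hd : (PySem.Dict.mk [("Metadata", m), ("Amp Model", a), ("EQ", e), ("Compression", co), ("Noise Gate", ng), ("Modulation", mo), ("Delay", de), ("Reverb", re), ("Cabinet", cb), ("Hardware Control A", ha), ("Hardware Control B", hb), ("Other", ot)] : PySem.Dict String (List String)).modify "Compression" [] (· ++ [c]) = PySem.Dict.mk [("Metadata", m), ("Amp Model", a), ("EQ", e), ("Compression", co ++ [c]), ("Noise Gate", ng), ("Modulation", mo), ("Delay", de), ("Reverb", re), ("Cabinet", cb), ("Hardware Control A", ha), ("Hardware Control B", hb), ("Other", ot)] := rfl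
      simp only [List.foldl_cons, hk, hd, ih]
      simp [hk]
    · have hd : (PySem.Dict.mk [("Metadata", m), ("Amp Model", a), ("EQ", e), ("Compression", co), ("Noise Gate", ng), ("Modulation", mo), ("Delay", de), ("Reverb", re), ("Cabinet", cb), ("Hardware Control A", ha), ("Hardware Control B", hb), ("Other", ot)] : PySem.Dict String (List String)).modify "Noise Gate" [] (· ++ [c]) = PySem.Dict.mk [("Metadata", m), ("Amp Model", a), ("EQ", e), ("Compression", co), ("Noise Gate", ng ++ [c]), ("Modulation", mo), ("Delay", de), ("Reverb", re), ("Cabinet", cb), ("Hardware Control A", ha), ("Hardware Control B", hb), ("Other", ot)] := rfl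
      simp only [List.foldl_cons, hk, hd, ih]
      simp [hk]
    · have hd : (PySem.Dict.mk [("Metadata", m), ("Amp Model", a), ("EQ", e), ("Compression", co), ("Noise Gate", ng), ("Modulation", mo), ("Delay", de), ("Reverb", re), ("Cabinet", cb), ("Hardware Control A", ha), ("Hardware Control B", hb), ("Other", ot)] : PySem.Dict String (List String)).modify "Modulation" [] (· ++ [c]) = PySem.Dict.mk [("Metadata", m), ("Amp Model", a), ("EQ", e), ("Compression", co), ("Noise Gate", ng), ("Modulation", mo ++ [c]), ("Delay", de), ("Reverb", re), ("Cabinet", cb), ("Hardware Control A", ha), ("Hardware Control B", hb), ("Other", ot)] := rfl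
      simp only [List.foldl_cons, hk, hd, ih]
      simp [hk]
    · have hd : (PySem.Dict.mk [("Metadata", m), ("Amp Model", a), ("EQ", e), ("Compression", co), ("Noise Gate", ng), ("Modulation", mo), ("Delay", de), ("Reverb", re), ("Cabinet", cb), ("Hardware Control A", ha), ("Hardware Control B", hb), ("Other", ot)] : PySem.Dict String (List String)).modify "Delay" [] (· ++ [c]) = PySem.Dict.mk [("Metadata", m), ("Amp Model", a), ("EQ", e), ("Compression", co), ("Noise Gate", ng), ("Modulation", mo), ("Delay", de ++ [c]), ("Reverb", re), ("Cabinet", cb), ("Hardware Control A", ha), ("Hardware Control B", hb), ("Other", ot)] := rfl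
      simp only [List.foldl_cons, hk, hd, ih]
      simp [hk]
    · have hd : (PySem.Dict.mk [("Metadata", m), ("Amp Model", a), ("EQ", e), ("Compression", co), ("Noise Gate", ng), ("Modulation", mo), ("Delay", de), ("Reverb", re), ("Cabinet", cb), ("Hardware Control A", ha), ("Hardware Control B", hb), ("Other", ot)] : PySem.Dict String (List String)).modify "Reverb" [] (· ++ [c]) = PySem.Dict.mk [("Metadata", m), ("Amp Model", a), ("EQ", e), ("Compression", co), ("Noise Gate", ng), ("Modulation", mo), ("Delay", de), ("Reverb", re ++ [c]), ("Cabinet", cb), ("Hardware Control A", ha), ("Hardware Control B", hb), ("Other", ot)] := rfl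
      simp only [List.foldl_cons, hk, hd, ih]
      simp [hk]
    · have hd : (PySem.Dict.mk [("Metadata", m), ("Amp Model", a), ("EQ", e), ("Compression", co), ("Noise Gate", ng), ("Modulation", mo), ("Delay", de), ("Reverb", re), ("Cabinet", cb), ("Hardware Control A", ha), ("Hardware Control B", hb), ("Other", ot)] : PySem.Dict String (List String)).modify "Cabinet" [] (· ++ [c]) = PySem.Dict.mk [("Metadata", m), ("Amp Model", a), ("EQ", e), ("Compression", co), ("Noise Gate", ng), ("Modulation", mo), ("Delay", de), ("Reverb", re), ("Cabinet", cb ++ [c]), ("Hardware Control A", ha), ("Hardware Control B", hb), ("Other", ot)] := rfl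
      simp only [List.foldl_cons, hk, hd, ih]
      simp [hk]
    · have hd : (PySem.Dict.mk [("Metadata", m), ("Amp Model", a), ("EQ", e), ("Compression", co), ("Noise Gate", ng), ("Modulation", mo), ("Delay", de), ("Reverb", re), ("Cabinet", cb), ("Hardware Control A", ha), ("Hardware Control B", hb), ("Other", ot)] : PySem.Dict String (List String)).modify "Hardware Control A" [] (· ++ [c]) = PySem.Dict.mk [("Metadata", m), ("Amp Model", a), ("EQ", e), ("Compression", co), ("Noise Gate", ng), ("Modulation", mo), ("Delay", de), ("Reverb", re), ("Cabinet", cb), ("Hardware Control A", ha ++ [c]), ("Hardware Control B", hb), ("Other", ot)] := rfl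
      simp only [List.foldl_cons, hk, hd, ih]
      simp [hk]
    · have hd : (PySem.Dict.mk [("Metadata", m), ("Amp Model", a), ("EQ", e), ("Compression", co), ("Noise Gate", ng), ("Modulation", mo), ("Delay", de), ("Reverb", re), ("Cabinet", cb), ("Hardware Control A", ha), ("Hardware Control B", hb), ("Other", ot)] : PySem.Dict String (List String)).modify "Hardware Control B" [] (· ++ [c]) = PySem.Dict.mk [("Metadata", m), ("Amp Model", a), ("EQ", e), ("Compression", co), ("Noise Gate", ng), ("Modulation", mo), ("Delay", de), ("Reverb", re), ("Cabinet", cb), ("Hardware Control A", ha), ("Hardware Control B", hb ++ [c]), ("Other", ot)] := rfl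
      simp only [List.foldl_cons, hk, hd, ih]
      simp [hk]
    · have hd : (PySem.Dict.mk [("Metadata", m), ("Amp Model", a), ("EQ", e), ("Compression", co), ("Noise Gate", ng), ("Modulation", mo), ("Delay", de), ("Reverb", re), ("Cabinet", cb), ("Hardware Control A", ha), ("Hardware Control B", hb), ("Other", ot)] : PySem.Dict String (List String)).modify "Other" [] (· ++ [c]) = PySem.Dict.mk [("Metadata", m), ("Amp Model", a), ("EQ", e), ("Compression", co), ("Noise Gate", ng), ("Modulation", mo), ("Delay", de), ("Reverb", re), ("Cabinet", cb), ("Hardware Control A", ha), ("Hardware Control B", hb), ("Other", ot ++ [c])] := rfl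
      simp only [List.foldl_cons, hk, hd, ih]
      simp [hk]

-- ===== VERDICT (by name: the statement is the Claim_ definition above) =====
theorem categorize_parameters_spec : Claim_equal_categorize_parameters := by
  intro columns _
  unfold Spec_categorize_parameters categorize_parameters categorize_parameters_alt
  have hstep : pvStepA = fun d c => d.modify (pvClassify c) [] (· ++ [c]) :=
    funext fun d => funext fun c => pvStepA_eq_modify_classify d c
  have hinit : (PySem.Dict.ofList
      [("Metadata", ([] : List String)), ("Amp Model", []), ("EQ", []), ("Compression", []),
       ("Noise Gate", []), ("Modulation", []), ("Delay", []), ("Reverb", []),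
       ("Cabinet", []), ("Hardware Control A", []), ("Hardware Control B", []), ("Other", [])])
      = PySem.Dict.mk
      [("Metadata", []), ("Amp Model", []), ("EQ", []), ("Compression", []),
       ("Noise Gate", []), ("Modulation", []), ("Delay", []), ("Reverb", []),
       ("Cabinet", []), ("Hardware Control A", []), ("Hardware Control B", []), ("Other", [])] := by
    decide
  rw [hstep, hinit, pvFold_classify]
  simp [pvCategoryNames, List.filter_map, List.map_map, Function.comp_def]
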